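-- pv_equiv track=rewrite | github.com/yiduoke/NLP-CDHK-2022 | gg_api.py | awardNameToKeywords
-- ===== SOURCE A (Python) =====
-- def awardNameToKeywords(text):
--     stops = ['by', 'an', 'a', 'or', 'in', 'for', '-']
--     l = text.lower().split()
--     for s in stops:
--         for i in range(l.count(s)):
--             l.remove(s)
--     for i in range(len(l)):
--         l[i] = l[i].replace(',', '')
--     return l
-- ===== SOURCE B (Python) =====
-- def awardNameToKeywords(text):
--     stops = {'by', 'an', 'a', 'or', 'in', 'for', '-'}
--     return [w.replace(',', '') for w in text.lower().split() if w not in stops]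
-- ===== Notes on version B (the rewrite author's own statement) =====
-- stated objective: simpler
-- what changed: Replaces A's outer loop over stop words with repeated count/remove scans (and a second index loop for comma stripping) by a single filtering pass against a stop-word set followed by a map.
import Mathlib
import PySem

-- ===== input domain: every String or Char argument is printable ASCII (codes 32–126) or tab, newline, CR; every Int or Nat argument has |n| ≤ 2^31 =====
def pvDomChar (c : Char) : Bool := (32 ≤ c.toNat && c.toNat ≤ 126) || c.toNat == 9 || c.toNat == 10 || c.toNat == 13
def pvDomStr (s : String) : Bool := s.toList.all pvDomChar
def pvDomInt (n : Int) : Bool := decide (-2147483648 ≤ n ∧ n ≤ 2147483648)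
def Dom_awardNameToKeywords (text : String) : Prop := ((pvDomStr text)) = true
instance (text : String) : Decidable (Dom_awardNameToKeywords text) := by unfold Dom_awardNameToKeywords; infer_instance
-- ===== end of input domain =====

-- B replaces A's per-stop-word count/remove scans by one filtering pass over a stop set, then a map; same return value.

-- ===== PORT A =====
def awardNameToKeywords (text : String) : List String :=
  let stops : List String := ["by", "an", "a", "or", "in", "for", "-"]
  let l := PySem.Str.split₀ (PySem.Str.lower text)
  let l := stops.foldl (fun l s =>
    (PySem.List.pyRange 0 (PySem.List.count l s : Int) 1).foldl
      (fun l _ => match PySem.List.remove? l s with | some l' => l' | none => l) l) l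
  -- 'for i in range(len(l)): l[i] = l[i].replace(",", "")' rewrites each slot in place
  l.map (fun w => PySem.Str.replace w "," "")

-- ===== PORT B =====
def awardNameToKeywords_alt (text : String) : List String :=
  let stops : PySem.Set String := PySem.Set.ofList ["by", "an", "a", "or", "in", "for", "-"]
  ((PySem.Str.split₀ (PySem.Str.lower text)).filter
      (fun w => !(PySem.Set.contains stops w))).map (fun w => PySem.Str.replace w "," "")

-- ===== PRECONDITION & SPEC =====
def Spec_awardNameToKeywords (text : String) (out : List String) : Prop := out = awardNameToKeywords_alt text
instance (text : String) (out : List String) : Decidable (Spec_awardNameToKeywords text out) := by unfold Spec_awardNameToKeywords; infer_instance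

-- ===== CLAIM (what is proved, stated in full; the proofs are below) =====
def Claim_equal_awardNameToKeywords : Prop := ∀ (text : String), Dom_awardNameToKeywords text → Spec_awardNameToKeywords text (awardNameToKeywords text)

-- ===== LEMMAS AND PROOFS =====

-- A fold whose body ignores the element is an iterate of the body.
theorem pv_foldl_const {α β : Type} (g : α → α) :
    ∀ (xs : List β) (a : α), xs.foldl (fun acc _ => g acc) a = g^[xs.length] a := by
  intro xs
  induction xs with
  | nil => intro a; rfl
  | cons x xs ih =>
      intro a
      simp [List.foldl_cons, ih, Function.iterate_succ_apply]

-- one Python 'l.remove(s)' step (no-op when s is absent, as guarded by the count)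
def pvRemove1 (s : String) (l : List String) : List String :=
  match PySem.List.remove? l s with | some l' => l' | none => l

theorem pv_filter_erase (p : String → Bool) (s : String) (hs : p s = false) :
    ∀ (l : List String), (l.erase s).filter p = l.filter p := by
  intro l
  induction l with
  | nil => rfl
  | cons a l ih =>
      by_cases ha : a = s
      · subst ha; simp [List.erase_cons_head, hs]
      · rw [List.erase_cons_tail (by simp [ha])]
        simp [List.filter_cons, ih]

theorem pv_iterate_remove (s : String) :
    ∀ (n : Nat) (l : List String), l.count s = n →
      (pvRemove1 s)^[n] l = l.filter (fun w => !(w == s)) := by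
  intro n
  induction n with
  | zero =>
      intro l h
      have hs : s ∉ l := by
        intro hm; have := List.count_pos_iff.mpr hm; omega
      rw [Function.iterate_zero_apply]
      symm
      rw [List.filter_eq_self]
      intro a ha
      have hne : a ≠ s := fun he => hs (he ▸ ha)
      simp [hne]
  | succ n ih =>
      intro l h
      have hm : s ∈ l := by
        by_contra hs
        rw [List.count_eq_zero_of_not_mem hs] at h; omega
      have h1 : pvRemove1 s l = l.erase s := by
        simp [pvRemove1, PySem.List.remove?_eq_some_erase _ _ hm]
      have h2 : (l.erase s).count s = n := by
        rw [List.count_erase_self]; omega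
      rw [Function.iterate_succ_apply, h1, ih _ h2,
        pv_filter_erase _ s (by simp) l]

-- the inner Python loop 'for i in range(l.count(s)): l.remove(s)' removes every s
theorem pv_loop_eq_filter (s : String) (l : List String) :
    (PySem.List.pyRange 0 (PySem.List.count l s : Int) 1).foldl
      (fun l _ => match PySem.List.remove? l s with | some l' => l' | none => l) l
      = l.filter (fun w => !(w == s)) := by
  have hlen : (PySem.List.pyRange 0 (PySem.List.count l s : Int) 1).length = l.count s := by
    rw [PySem.List.length_pyRange_one]
    simp [PySem.List.count_eq]
  calc (PySem.List.pyRange 0 (PySem.List.count l s : Int) 1).foldl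
        (fun l _ => match PySem.List.remove? l s with | some l' => l' | none => l) l
      = (pvRemove1 s)^[(PySem.List.pyRange 0 (PySem.List.count l s : Int) 1).length] l := by
        exact pv_foldl_const (pvRemove1 s) _ l
    _ = (pvRemove1 s)^[l.count s] l := by rw [hlen]
    _ = l.filter (fun w => !(w == s)) := pv_iterate_remove s _ l rfl

-- ===== VERDICT (by name: the statement is the Claim_ definition above) =====
theorem awardNameToKeywords_spec : Claim_equal_awardNameToKeywords := by
  intro text _
  unfold Spec_awardNameToKeywords awardNameToKeywords awardNameToKeywords_alt
  simp only [List.foldl_cons, List.foldl_nil, pv_loop_eq_filter, List.filter_filter]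
  congr 1
  apply List.filter_congr
  intro w _
  have hst : (PySem.Set.ofList ["by", "an", "a", "or", "in", "for", "-"] : List String)
      = ["by", "an", "a", "or", "in", "for", "-"] := by decide
  simp only [PySem.Set.contains_eq_listContains, hst]
  cases h1 : w == "by" <;> cases h2 : w == "an" <;> cases h3 : w == "a" <;>
    cases h4 : w == "or" <;> cases h5 : w == "in" <;> cases h6 : w == "for" <;>
    cases h7 : w == "-" <;>
    simp_all
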